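-- pv_equiv track=rewrite | github.com/baekhangyeol/CodingTest_Practice | 백준/Silver/21735. 눈덩이 굴리기/눈덩이 굴리기.py | bfs
-- ===== SOURCE A (Python) =====
-- from collections import deque
--
-- def bfs(N, M, a):
--     queue = deque()
--
--     # 시작위치 0, 눈덩이 크기 1, 시간 0초
--     queue.append((-1, 1, 0))
--     maxSize = 1
--
--     while queue:
--         location, size, time = queue.popleft()
--
--         # 종료 조건: 시간 초과 or 마지막 칸 도달
--         if time == M or location == N - 1:
--             maxSize = max(maxSize, size)
--             continue
--
--         # 눈동이를 한 칸 이동시킬 경우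
--         nextLoc1 = location + 1
--         if nextLoc1 < N:
--             nextSize1 = size + a[nextLoc1]
--             queue.append((nextLoc1, nextSize1, time + 1))
--
--         # 눈덩이를 두 칸 이동시킬 경우
--         nextLoc2 = location + 2
--         if nextLoc2 < N:
--             nextSize2 = size // 2 + a[nextLoc2]
--             queue.append((nextLoc2, nextSize2, time + 1))
--
--
--     return maxSize
-- ===== SOURCE B (Python) =====
-- def bfs(N, M, a):
--     # Alternative: recursive DFS returning the best terminal size directly (no queue, no accumulator).
--     def go(location, size, time):
--         if time == M or location == N - 1:
--             return size
--         results = []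
--         if location + 1 < N:
--             results.append(go(location + 1, size + a[location + 1], time + 1))
--         if location + 2 < N:
--             results.append(go(location + 2, size // 2 + a[location + 2], time + 1))
--         results = [r for r in results if r is not None]
--         return max(results) if results else None
--     r = go(-1, 1, 0)
--     return 1 if r is None else max(1, r)
-- ===== Notes on version B (the rewrite author's own statement) =====
-- stated objective: alternative
-- what changed: Replaces A's explicit FIFO-queue BFS with an accumulator by a recursive DFS that returns the best terminal snowball size directly (Optional max over the two moves), with no queue and no running maximum.
import Mathlib
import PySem

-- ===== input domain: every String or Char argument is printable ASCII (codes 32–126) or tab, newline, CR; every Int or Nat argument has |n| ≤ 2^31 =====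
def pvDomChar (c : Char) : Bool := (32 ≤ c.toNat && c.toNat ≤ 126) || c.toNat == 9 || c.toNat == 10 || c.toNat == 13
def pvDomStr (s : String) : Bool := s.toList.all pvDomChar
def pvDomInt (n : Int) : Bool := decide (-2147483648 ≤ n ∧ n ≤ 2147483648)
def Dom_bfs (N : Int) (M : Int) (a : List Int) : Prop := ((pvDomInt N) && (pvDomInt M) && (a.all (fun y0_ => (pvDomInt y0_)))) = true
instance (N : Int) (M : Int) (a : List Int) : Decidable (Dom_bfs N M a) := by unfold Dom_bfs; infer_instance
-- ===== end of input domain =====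

-- B replaces A's explicit BFS queue with a recursive DFS that returns the best terminal size
-- directly (objective: alternative decomposition, same cost); equal return value on Pre_.

-- termination measure shared by both ports (cited in decreasing_by only)
def pvW (N M : Int) (s : Int × Int × Int) : Nat :=
  3 ^ (2 * (N - 1 - s.1).toNat + (M - s.2.2).natAbs)

theorem pvW_child (N M loc sz t d sz' : Int) (hd : d = 1 ∨ d = 2) (h : loc + 1 < N) :
    pvW N M (loc + d, sz', t + 1) * 3 ≤ pvW N M (loc, sz, t) := by
  have he : (2 * (N - 1 - (loc + d)).toNat + (M - (t + 1)).natAbs) + 1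
      ≤ 2 * (N - 1 - loc).toNat + (M - t).natAbs := by omega
  calc pvW N M (loc + d, sz', t + 1) * 3
      = 3 ^ ((2 * (N - 1 - (loc + d)).toNat + (M - (t + 1)).natAbs) + 1) := by
        simp [pvW, pow_succ]
    _ ≤ 3 ^ (2 * (N - 1 - loc).toNat + (M - t).natAbs) :=
        Nat.pow_le_pow_right (by norm_num) he
    _ = pvW N M (loc, sz, t) := rfl

theorem pvW_pos (N M : Int) (s : Int × Int × Int) : 0 < pvW N M s :=
  Nat.pow_pos (by norm_num)

-- ===== PORT A =====
def bfsLoop (N M : Int) (a : List Int) : List (Int × Int × Int) → Int → Int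
  | [], maxSize => maxSize
  | (location, size, time) :: rest, maxSize =>
    if time = M ∨ location = N - 1 then
      bfsLoop N M a rest (max maxSize size)
    else
      bfsLoop N M a
        ((if location + 1 < N then
            rest ++ [(location + 1, size + ((PySem.List.pyGet? a (location + 1)).getD 0), time + 1)]
          else rest)
         ++ (if location + 2 < N then
              [(location + 2, PySem.Int.floordiv size 2 + ((PySem.List.pyGet? a (location + 2)).getD 0), time + 1)]
             else []))
        maxSize
  termination_by q _ => (q.map (pvW N M)).sum
  decreasing_by
  · have hp := pvW_pos N M (location, size, time)
    simp only [List.map_cons, List.sum_cons]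
    omega
  · split_ifs with h1 h2 h2
    · have c1 := pvW_child N M location size time 1 (size + ((PySem.List.pyGet? a (location + 1)).getD 0)) (Or.inl rfl) h1
      have c2 := pvW_child N M location size time 2 (PySem.Int.floordiv size 2 + ((PySem.List.pyGet? a (location + 2)).getD 0)) (Or.inr rfl) h1
      have p1 := pvW_pos N M (location + 1, size + ((PySem.List.pyGet? a (location + 1)).getD 0), time + 1)
      simp only [List.map_append, List.sum_append, List.map_cons, List.sum_cons, List.map_nil,
        List.sum_nil]
      omega
    · have c1 := pvW_child N M location size time 1 (size + ((PySem.List.pyGet? a (location + 1)).getD 0)) (Or.inl rfl) h1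
      have p1 := pvW_pos N M (location + 1, size + ((PySem.List.pyGet? a (location + 1)).getD 0), time + 1)
      simp only [List.map_append, List.sum_append, List.map_cons, List.sum_cons, List.map_nil,
        List.sum_nil]
      omega
    · exact absurd (by omega : location + 1 < N) h1
    · have hp := pvW_pos N M (location, size, time)
      simp only [List.map_append, List.sum_append, List.map_cons, List.sum_cons, List.map_nil,
        List.sum_nil]
      omega

def bfs (N : Int) (M : Int) (a : List Int) : Int :=
  bfsLoop N M a [(-1, 1, 0)] 1

-- ===== PORT B =====
def goAlt (N M : Int) (a : List Int) (location size time : Int) : Option Int :=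
  if time = M ∨ location = N - 1 then some size
  else
    let r1 : Option Int :=
      if h1 : location + 1 < N then
        goAlt N M a (location + 1) (size + ((PySem.List.pyGet? a (location + 1)).getD 0)) (time + 1)
      else none
    let r2 : Option Int :=
      if h2 : location + 2 < N then
        goAlt N M a (location + 2) (PySem.Int.floordiv size 2 + ((PySem.List.pyGet? a (location + 2)).getD 0)) (time + 1)
      else none
    match r1, r2 with
    | none, none => none
    | some x, none => some x
    | none, some y => some y
    | some x, some y => some (max x y)
  termination_by pvW N M (location, size, time)
  decreasing_by
  · have c1 := pvW_child N M location size time 1 (size + ((PySem.List.pyGet? a (location + 1)).getD 0)) (Or.inl rfl) h1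
    have p1 := pvW_pos N M (location + 1, size + ((PySem.List.pyGet? a (location + 1)).getD 0), time + 1)
    omega
  · have c2 := pvW_child N M location size time 2 (PySem.Int.floordiv size 2 + ((PySem.List.pyGet? a (location + 2)).getD 0)) (Or.inr rfl) (by omega)
    have p2 := pvW_pos N M (location + 2, PySem.Int.floordiv size 2 + ((PySem.List.pyGet? a (location + 2)).getD 0), time + 1)
    omega

def bfs_alt (N : Int) (M : Int) (a : List Int) : Int :=
  match goAlt N M a (-1) 1 0 with
  | none => 1
  | some r => max 1 r

-- ===== PRECONDITION & SPEC =====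
-- Pre_ excludes exactly the inputs where A raises IndexError: len(a) must cover every cell the
-- snowball can be rolled onto (index min(N,2M)-1 when M ≥ 0, index N-1 when M < 0).
def Pre_bfs (N : Int) (M : Int) (a : List Int) : Prop :=
  (if 0 ≤ M then min N (2 * M) else N) ≤ (a.length : Int)
instance (N : Int) (M : Int) (a : List Int) : Decidable (Pre_bfs N M a) := by
  unfold Pre_bfs; infer_instance

def pvWitness_bfs : Int × Int × List Int := (2, 3, [5, 4])

def Spec_bfs (N : Int) (M : Int) (a : List Int) (out : Int) : Prop := out = bfs_alt N M a
instance (N : Int) (M : Int) (a : List Int) (out : Int) : Decidable (Spec_bfs N M a out) := by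
  unfold Spec_bfs; infer_instance

-- ===== CLAIM (what is proved, stated in full; the proofs are below) =====
def Claim_equal_bfs : Prop :=
  ∀ (N : Int) (M : Int) (a : List Int), Dom_bfs N M a → Pre_bfs N M a → Spec_bfs N M a (bfs N M a)

-- ===== LEMMAS AND PROOFS =====
def pvStep (N M : Int) (a : List Int) (acc : Int) (s : Int × Int × Int) : Int :=
  match goAlt N M a s.1 s.2.1 s.2.2 with
  | none => acc
  | some x => max acc x

theorem pvStep_comm (N M : Int) (a : List Int) (m : Int) (s s' : Int × Int × Int) :
    pvStep N M a (pvStep N M a m s) s' = pvStep N M a (pvStep N M a m s') s := by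
  unfold pvStep
  cases goAlt N M a s.1 s.2.1 s.2.2 <;> cases goAlt N M a s'.1 s'.2.1 s'.2.2 <;>
    simp [max_comm, max_left_comm]

theorem foldl_pvStep_comm (N M : Int) (a : List Int) (l : List (Int × Int × Int))
    (m : Int) (s : Int × Int × Int) :
    List.foldl (pvStep N M a) (pvStep N M a m s) l
      = pvStep N M a (List.foldl (pvStep N M a) m l) s := by
  induction l generalizing m with
  | nil => rfl
  | cons c cs ih =>
    simp only [List.foldl]
    rw [pvStep_comm N M a m s c]
    exact ih (pvStep N M a m c)

theorem foldl_pvStep_swap (N M : Int) (a : List Int) (cs rest : List (Int × Int × Int)) (m : Int) :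
    List.foldl (pvStep N M a) (List.foldl (pvStep N M a) m rest) cs
      = List.foldl (pvStep N M a) (List.foldl (pvStep N M a) m cs) rest := by
  induction cs generalizing m with
  | nil => rfl
  | cons c cs ih =>
    simp only [List.foldl]
    rw [← foldl_pvStep_comm]
    exact ih (pvStep N M a m c)

theorem bfsLoop_eq_foldl (N M : Int) (a : List Int) (q : List (Int × Int × Int)) (m : Int) :
    bfsLoop N M a q m = List.foldl (pvStep N M a) m q := by
  induction q, m using bfsLoop.induct N M a with
  | case1 m =>
    rw [bfsLoop]
    rfl
  | case2 location size time rest m h ih =>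
    rw [bfsLoop, if_pos h, ih]
    simp only [List.foldl]
    unfold pvStep
    rw [goAlt, if_pos h]
  | case3 location size time rest m h ih =>
    simp only [dite_eq_ite] at ih
    rw [bfsLoop, if_neg h, ih]
    have hsplit :
        ((if location + 1 < N then
            rest ++ [(location + 1, size + ((PySem.List.pyGet? a (location + 1)).getD 0), time + 1)]
          else rest)
         ++ (if location + 2 < N then
              [(location + 2, PySem.Int.floordiv size 2 + ((PySem.List.pyGet? a (location + 2)).getD 0), time + 1)]
             else []))
        = rest ++
          ((if location + 1 < N then
              [(location + 1, size + ((PySem.List.pyGet? a (location + 1)).getD 0), time + 1)]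
            else [])
           ++ (if location + 2 < N then
                [(location + 2, PySem.Int.floordiv size 2 + ((PySem.List.pyGet? a (location + 2)).getD 0), time + 1)]
               else [])) := by
      split_ifs <;> simp
    rw [hsplit, List.foldl_append, foldl_pvStep_swap]
    simp only [List.foldl]
    congr 1
    show List.foldl (pvStep N M a) m _ = pvStep N M a m (location, size, time)
    conv_rhs => unfold pvStep
    rw [goAlt, if_neg h]
    simp only []
    by_cases h1 : location + 1 < N
    · by_cases h2 : location + 2 < N
      · rw [if_pos h1, if_pos h2, dif_pos h1, dif_pos h2, List.foldl_append]
        simp only [List.foldl]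
        unfold pvStep
        simp only []
        cases goAlt N M a (location + 1) (size + ((PySem.List.pyGet? a (location + 1)).getD 0)) (time + 1) <;>
          cases goAlt N M a (location + 2) (PySem.Int.floordiv size 2 + ((PySem.List.pyGet? a (location + 2)).getD 0)) (time + 1) <;>
          simp [max_assoc]
      · rw [if_pos h1, if_neg h2, dif_pos h1, dif_neg h2]
        simp only [List.append_nil, List.foldl]
        unfold pvStep
        simp only []
        cases goAlt N M a (location + 1) (size + ((PySem.List.pyGet? a (location + 1)).getD 0)) (time + 1) <;> simp
    · have h2 : ¬ location + 2 < N := by omega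
      rw [if_neg h1, if_neg h2, dif_neg h1, dif_neg h2]
      simp

-- ===== VERDICT (by name: the statement is the Claim_ definition above) =====
theorem bfs_spec : Claim_equal_bfs := by
  intro N M a _ _
  unfold Spec_bfs bfs bfs_alt
  rw [bfsLoop_eq_foldl]
  simp only [List.foldl]
  unfold pvStep
  cases goAlt N M a (-1) 1 0 <;> rfl
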